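-- pv_equiv track=rewrite | github.com/Pronting/eisenhower | backend/app/agent/summarize.py | _basic_stats
-- ===== SOURCE A (Python) =====
-- def _basic_stats(tasks: list[dict]) -> dict:
--     pending = sum(1 for t in tasks if t.get("status") == "pending")
--     completed = sum(1 for t in tasks if t.get("status") == "completed")
--     return {
--         "total": len(tasks),
--         "pending": pending,
--         "completed": completed,
--         "q1": sum(1 for t in tasks if t.get("quadrant") == "q1"),
--         "q2": sum(1 for t in tasks if t.get("quadrant") == "q2"),
--         "q3": sum(1 for t in tasks if t.get("quadrant") == "q3"),
--         "q4": sum(1 for t in tasks if t.get("quadrant") == "q4"),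
--     }
-- ===== SOURCE B (Python) =====
-- def _basic_stats(tasks: list[dict]) -> dict:
--     # divide and conquer: stats of a singleton, merged pairwise over halves
--     def solo(t):
--         s = t.get("status")
--         q = t.get("quadrant")
--         return {
--             "total": 1,
--             "pending": 1 if s == "pending" else 0,
--             "completed": 1 if s == "completed" else 0,
--             "q1": 1 if q == "q1" else 0,
--             "q2": 1 if q == "q2" else 0,
--             "q3": 1 if q == "q3" else 0,
--             "q4": 1 if q == "q4" else 0,
--         }
--
--     def go(lo, hi):
--         if hi - lo == 0:
--             return {"total": 0, "pending": 0, "completed": 0,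
--                     "q1": 0, "q2": 0, "q3": 0, "q4": 0}
--         if hi - lo == 1:
--             return solo(tasks[lo])
--         mid = (lo + hi) // 2
--         left = go(lo, mid)
--         right = go(mid, hi)
--         return {k: left[k] + right[k] for k in left}
--
--     return go(0, len(tasks))
-- ===== Notes on version B (the rewrite author's own statement) =====
-- stated objective: alternative
-- what changed: Replaces six independent generator-sum scans with a divide-and-conquer recursion: singleton stat records for each task are merged pairwise over halves of the index range, exploiting that the stats form a monoid under componentwise addition.
import Mathlib
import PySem

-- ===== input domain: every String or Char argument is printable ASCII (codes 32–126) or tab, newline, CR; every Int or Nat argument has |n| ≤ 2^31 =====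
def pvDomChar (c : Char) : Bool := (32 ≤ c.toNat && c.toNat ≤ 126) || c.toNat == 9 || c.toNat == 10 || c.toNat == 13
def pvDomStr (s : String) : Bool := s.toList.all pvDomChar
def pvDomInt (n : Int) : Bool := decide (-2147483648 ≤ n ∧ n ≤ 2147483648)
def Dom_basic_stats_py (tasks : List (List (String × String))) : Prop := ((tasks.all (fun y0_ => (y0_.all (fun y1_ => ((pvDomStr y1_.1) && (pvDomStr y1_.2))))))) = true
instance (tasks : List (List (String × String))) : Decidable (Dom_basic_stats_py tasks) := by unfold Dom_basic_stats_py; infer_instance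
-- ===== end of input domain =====

-- B replaces A's six independent scans with a divide-and-conquer merge of per-task stat records (objective: alternative algorithm).


-- ===== PORT A =====
def basic_stats_py (tasks : List (List (String × String))) : List (String × Int) :=
  let pending := ((tasks.map (fun t => if (PySem.Dict.mk t).get? "status" == some "pending" then (1 : Int) else 0)).sum)
  let completed := ((tasks.map (fun t => if (PySem.Dict.mk t).get? "status" == some "completed" then (1 : Int) else 0)).sum)
  [("total", (tasks.length : Int)),
   ("pending", pending),
   ("completed", completed),
   ("q1", ((tasks.map (fun t => if (PySem.Dict.mk t).get? "quadrant" == some "q1" then (1 : Int) else 0)).sum)),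
   ("q2", ((tasks.map (fun t => if (PySem.Dict.mk t).get? "quadrant" == some "q2" then (1 : Int) else 0)).sum)),
   ("q3", ((tasks.map (fun t => if (PySem.Dict.mk t).get? "quadrant" == some "q3" then (1 : Int) else 0)).sum)),
   ("q4", ((tasks.map (fun t => if (PySem.Dict.mk t).get? "quadrant" == some "q4" then (1 : Int) else 0)).sum))]

-- ===== PORT B =====
-- stats of a single task
def pvSolo (t : List (String × String)) : List (String × Int) :=
  let s := (PySem.Dict.mk t).get? "status"
  let q := (PySem.Dict.mk t).get? "quadrant"
  [("total", (1 : Int)),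
   ("pending", if s == some "pending" then (1 : Int) else 0),
   ("completed", if s == some "completed" then (1 : Int) else 0),
   ("q1", if q == some "q1" then (1 : Int) else 0),
   ("q2", if q == some "q2" then (1 : Int) else 0),
   ("q3", if q == some "q3" then (1 : Int) else 0),
   ("q4", if q == some "q4" then (1 : Int) else 0)]

def pvZero : List (String × Int) :=
  [("total", 0), ("pending", 0), ("completed", 0), ("q1", 0), ("q2", 0), ("q3", 0), ("q4", 0)]

-- {k: left[k] + right[k] for k in left}; right[k] ported as getD (exact here: both records carry the same seven keys)
def pvMerge (a b : List (String × Int)) : List (String × Int) :=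
  a.map (fun kv => (kv.1, kv.2 + (PySem.Dict.mk b).getD kv.1 0))

-- go(lo, hi): divide and conquer on the index range; tasks[lo] ported as getD (exact: go only reads
-- in-range indices); fuel = hi - lo bounds the recursion depth so it is structural (fuel never runs
-- out on the calls actually made, proved in pvGo_eq_stats below)
def pvGo (tasks : List (List (String × String))) : Nat → Nat → Nat → List (String × Int)
  | 0, _, _ => pvZero
  | fuel + 1, lo, hi =>
    if hi - lo = 0 then pvZero
    else if hi - lo = 1 then pvSolo (tasks.getD lo [])
    else
      let mid := (lo + hi) / 2
      pvMerge (pvGo tasks fuel lo mid) (pvGo tasks fuel mid hi)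

def basic_stats_py_alt (tasks : List (List (String × String))) : List (String × Int) :=
  pvGo tasks tasks.length 0 tasks.length

-- ===== PRECONDITION & SPEC =====
def Spec_basic_stats_py (tasks : List (List (String × String))) (out : List (String × Int)) : Prop := out = basic_stats_py_alt tasks
instance (tasks : List (List (String × String))) (out : List (String × Int)) : Decidable (Spec_basic_stats_py tasks out) := by unfold Spec_basic_stats_py; infer_instance

-- ===== CLAIM (what is proved, stated in full; the proofs are below) =====
def Claim_equal_basic_stats_py : Prop := ∀ (tasks : List (List (String × String))), Dom_basic_stats_py tasks → Spec_basic_stats_py tasks (basic_stats_py tasks)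

-- ===== LEMMAS AND PROOFS =====

-- A's stats of an arbitrary list (proof helper; A itself is this applied to tasks)
def pvStats (l : List (List (String × String))) : List (String × Int) :=
  [("total", (l.length : Int)),
   ("pending", ((l.map (fun t => if (PySem.Dict.mk t).get? "status" == some "pending" then (1 : Int) else 0)).sum)),
   ("completed", ((l.map (fun t => if (PySem.Dict.mk t).get? "status" == some "completed" then (1 : Int) else 0)).sum)),
   ("q1", ((l.map (fun t => if (PySem.Dict.mk t).get? "quadrant" == some "q1" then (1 : Int) else 0)).sum)),
   ("q2", ((l.map (fun t => if (PySem.Dict.mk t).get? "quadrant" == some "q2" then (1 : Int) else 0)).sum)),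
   ("q3", ((l.map (fun t => if (PySem.Dict.mk t).get? "quadrant" == some "q3" then (1 : Int) else 0)).sum)),
   ("q4", ((l.map (fun t => if (PySem.Dict.mk t).get? "quadrant" == some "q4" then (1 : Int) else 0)).sum))]

theorem pvStats_append (l1 l2 : List (List (String × String))) :
    pvStats (l1 ++ l2) = pvMerge (pvStats l1) (pvStats l2) := by
  simp [pvStats, pvMerge, PySem.Dict.getD, PySem.Dict.get?_mk_cons]

theorem pvStats_singleton (t : List (String × String)) : pvStats [t] = pvSolo t := by
  simp [pvStats, pvSolo]

theorem pvGo_eq_stats (tasks : List (List (String × String))) :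
    ∀ fuel lo hi, hi - lo ≤ fuel → hi ≤ tasks.length →
      pvGo tasks fuel lo hi = pvStats ((tasks.drop lo).take (hi - lo)) := by
  intro fuel
  induction fuel with
  | zero =>
    intro lo hi hn _
    have h0 : hi - lo = 0 := by omega
    simp [pvGo, h0, pvZero, pvStats]
  | succ fuel ih =>
    intro lo hi hn hle
    rw [pvGo]
    by_cases h0 : hi - lo = 0
    · simp [h0, pvZero, pvStats]
    · by_cases h1 : hi - lo = 1
      · have hlt : lo < tasks.length := by omega
        rw [if_neg h0, if_pos h1, h1, List.drop_eq_getElem_cons hlt, List.take_succ_cons,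
          List.take_zero, pvStats_singleton, List.getD_eq_getElem?_getD,
          List.getElem?_eq_getElem hlt, Option.getD_some]
      · simp only [h0, h1, if_false]
        have hmid1 : lo < (lo + hi) / 2 := by omega
        have hmid2 : (lo + hi) / 2 < hi := by omega
        rw [ih lo _ (by omega) (by omega), ih _ hi (by omega) hle]
        rw [← pvStats_append]
        congr 1
        have : tasks.drop ((lo + hi) / 2) = (tasks.drop lo).drop ((lo + hi) / 2 - lo) := by
          rw [List.drop_drop]; congr 1; omega
        rw [this, ← List.take_add]
        congr 1
        omega

-- ===== VERDICT (by name: the statement is the Claim_ definition above) =====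
theorem basic_stats_py_spec : Claim_equal_basic_stats_py := by
  intro tasks _
  unfold Spec_basic_stats_py basic_stats_py_alt
  rw [pvGo_eq_stats tasks tasks.length 0 tasks.length (by omega) le_rfl]
  simp [pvStats, basic_stats_py]
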